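-- pv_equiv track=rewrite | github.com/fabiog1901/cp | cp/backend/create_cluster.py | get_node_count_per_zone
-- ===== SOURCE A (Python) =====
-- def get_node_count_per_zone(zone_count: int, node_count: int) -> list[int]:
--     # make a list with the same size as the count of zones
--     # zone = 3, nodes = 8 ==> [3, 3, 2]
--
--     l = [0] * zone_count
--     i = 0
--
--     # distribute node to each zone
--     for _ in range(node_count):
--         l[i] += 1
--         i += 1
--         if i == zone_count:
--             i = 0
--
--     return l
-- ===== SOURCE B (Python) =====
-- def get_node_count_per_zone(zone_count: int, node_count: int) -> list[int]:
--     # closed form: each zone gets node_count // zone_count nodes, and the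
--     # first node_count % zone_count zones get one extra
--     nodes = max(node_count, 0)
--     q, r = divmod(nodes, zone_count)
--     return [q + 1] * r + [q] * (zone_count - r)
-- ===== Notes on version B (the rewrite author's own statement) =====
-- stated objective: faster
-- what changed: Replaces the node-by-node round-robin loop over node_count iterations with a closed-form divmod: each zone gets node_count // zone_count nodes and the first node_count % zone_count zones get one extra.
-- outside the precondition, e.g. on get_node_count_per_zone(0, 0): A returns [], B raises ZeroDivisionError
import Mathlib
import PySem

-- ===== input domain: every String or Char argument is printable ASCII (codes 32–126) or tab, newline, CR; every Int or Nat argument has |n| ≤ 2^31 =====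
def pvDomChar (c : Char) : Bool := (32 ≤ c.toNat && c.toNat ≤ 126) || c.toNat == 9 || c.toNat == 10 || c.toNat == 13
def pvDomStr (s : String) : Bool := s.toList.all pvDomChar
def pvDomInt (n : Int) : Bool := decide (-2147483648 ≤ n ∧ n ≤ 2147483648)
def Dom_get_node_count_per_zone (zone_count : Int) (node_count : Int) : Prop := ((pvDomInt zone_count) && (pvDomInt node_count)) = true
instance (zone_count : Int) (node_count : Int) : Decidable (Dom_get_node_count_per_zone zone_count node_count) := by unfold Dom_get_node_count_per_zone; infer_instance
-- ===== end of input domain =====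

-- B replaces A's node-by-node round-robin loop with a closed-form divmod split (each zone gets node_count // zone_count nodes, the first node_count % zone_count zones one extra).


-- ===== PORT A =====
-- the body of `for _ in range(node_count)`: l[i] += 1; i += 1; if i == zone_count: i = 0
-- l[i] is pyGet? (none = IndexError); i is always ≥ 0 here, so the write l[i] = v+1 is pySetD
def pvALoop (zone_count : Int) : Nat → List Int → Int → Option (List Int × Int)
  | 0, l, i => some (l, i)
  | k + 1, l, i =>
    match PySem.List.pyGet? l i with
    | none => none
    | some v =>
      let l' := PySem.List.pySetD l i (v + 1)
      let i' := i + 1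
      pvALoop zone_count k l' (if i' = zone_count then 0 else i')

def get_node_count_per_zone (zone_count : Int) (node_count : Int) : List Int :=
  -- l = [0] * zone_count; i = 0; range(node_count) has node_count.toNat iterations
  match pvALoop zone_count node_count.toNat (List.replicate zone_count.toNat 0) 0 with
  | some (l, _) => l
  | none => []   -- IndexError in Python; excluded by Pre_

-- ===== PORT B =====
-- nodes = max(node_count, 0); q, r = divmod(nodes, zone_count); [q+1]*r + [q]*(zone_count-r)
def get_node_count_per_zone_alt (zone_count : Int) (node_count : Int) : List Int :=
  match PySem.Int.divmod? (max node_count 0) zone_count with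
  | none => []   -- ZeroDivisionError in Python; excluded by Pre_
  | some (q, r) => List.replicate r.toNat (q + 1) ++ List.replicate (zone_count - r).toNat q

-- ===== PRECONDITION & SPEC =====
-- Pre_ excludes exactly the inputs on which one of the two Pythons raises:
-- zone_count ≤ 0 with node_count > 0 (A raises IndexError: l = [0]*zone_count is empty), and
-- zone_count = 0 (with node_count ≤ 0 A returns [] there, but B's divmod raises ZeroDivisionError).
def Pre_get_node_count_per_zone (zone_count : Int) (node_count : Int) : Prop :=
  zone_count ≠ 0 ∧ (0 < zone_count ∨ node_count ≤ 0)
instance (zone_count : Int) (node_count : Int) : Decidable (Pre_get_node_count_per_zone zone_count node_count) := by unfold Pre_get_node_count_per_zone; infer_instance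
def pvWitness_get_node_count_per_zone : Int × Int := (3, 8)

def Spec_get_node_count_per_zone (zone_count : Int) (node_count : Int) (out : List Int) : Prop := out = get_node_count_per_zone_alt zone_count node_count
instance (zone_count : Int) (node_count : Int) (out : List Int) : Decidable (Spec_get_node_count_per_zone zone_count node_count out) := by unfold Spec_get_node_count_per_zone; infer_instance

-- ===== CLAIM (what is proved, stated in full; the proofs are below) =====
def Claim_equal_get_node_count_per_zone : Prop := ∀ (zone_count : Int) (node_count : Int), Dom_get_node_count_per_zone zone_count node_count → Pre_get_node_count_per_zone zone_count node_count → Spec_get_node_count_per_zone zone_count node_count (get_node_count_per_zone zone_count node_count)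


-- ===== LEMMAS AND PROOFS =====

-- the state of A's list after m nodes have been placed round-robin into Z zones
def pvState (Z m : Nat) : List Int :=
  (List.range Z).map (fun j => ((m / Z : Nat) : Int) + if j < m % Z then 1 else 0)

theorem pvState_length (Z m : Nat) : (pvState Z m).length = Z := by
  simp [pvState]

theorem pvState_getElem (Z m j : Nat) (hj : j < Z) :
    (pvState Z m)[j]'(by simpa [pvState_length] using hj) =
      ((m / Z : Nat) : Int) + if j < m % Z then 1 else 0 := by
  simp [pvState]

theorem pvState_succ (Z m : Nat) (hZ : 0 < Z) :
    pvState Z (m + 1) = (pvState Z m).set (m % Z) (((m / Z : Nat) : Int) + 1) := by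
  have hr : m % Z < Z := Nat.mod_lt _ hZ
  have hdm := Nat.div_add_mod m Z
  have hdiv : (m + 1) / Z = m / Z + (m % Z + 1) / Z := by
    conv_lhs => rw [show m + 1 = Z * (m / Z) + (m % Z + 1) by omega]
    rw [Nat.mul_add_div hZ]
  have hmod : (m + 1) % Z = (m % Z + 1) % Z := by
    conv_lhs => rw [show m + 1 = Z * (m / Z) + (m % Z + 1) by omega]
    rw [Nat.mul_add_mod]
  apply List.ext_getElem
  · simp [pvState_length]
  · intro j hj _
    have hjZ : j < Z := by simpa [pvState_length] using hj
    rw [List.getElem_set]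
    rcases Nat.lt_or_ge (m % Z + 1) Z with hcase | hcase
    · -- no wrap: (m+1)/Z = m/Z, (m+1)%Z = m%Z + 1
      have h1 : (m + 1) / Z = m / Z := by rw [hdiv, Nat.div_eq_of_lt hcase]; omega
      have h2 : (m + 1) % Z = m % Z + 1 := by rw [hmod, Nat.mod_eq_of_lt hcase]
      rw [pvState_getElem Z (m+1) j hjZ, pvState_getElem Z m j hjZ, h1, h2]
      split_ifs <;> push_cast <;> omega
    · -- wrap: m%Z = Z-1, (m+1)/Z = m/Z + 1, (m+1)%Z = 0
      have hrZ : m % Z + 1 = Z := by omega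
      have h1 : (m + 1) / Z = m / Z + 1 := by
        rw [hdiv, hrZ, Nat.div_self hZ]
      have h2 : (m + 1) % Z = 0 := by rw [hmod, hrZ, Nat.mod_self]
      rw [pvState_getElem Z (m+1) j hjZ, pvState_getElem Z m j hjZ, h1, h2]
      split_ifs <;> push_cast <;> omega

theorem pvALoop_inv (Z : Nat) (hZ : 0 < Z) (k : Nat) :
    ∀ m : Nat,
      pvALoop (Z : Int) k (pvState Z m) ((m % Z : Nat) : Int) =
        some (pvState Z (m + k), (((m + k) % Z : Nat) : Int)) := by
  induction k with
  | zero => intro m; simp [pvALoop]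
  | succ k ih =>
    intro m
    have hr : m % Z < Z := Nat.mod_lt _ hZ
    have hdm := Nat.div_add_mod m Z
    have hget : PySem.List.pyGet? (pvState Z m) ((m % Z : Nat) : Int) =
        some ((m / Z : Nat) : Int) := by
      rw [PySem.List.pyGet?_natCast]
      rw [List.getElem?_eq_getElem (by simpa [pvState_length] using hr)]
      rw [pvState_getElem Z m (m % Z) hr]
      simp
    have hset : PySem.List.pySetD (pvState Z m) ((m % Z : Nat) : Int)
        (((m / Z : Nat) : Int) + 1) = pvState Z (m + 1) := by
      rw [PySem.List.pySetD_natCast, ← pvState_succ Z m hZ]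
    have hmod : (m + 1) % Z = (m % Z + 1) % Z := by
      conv_lhs => rw [show m + 1 = Z * (m / Z) + (m % Z + 1) by omega]
      rw [Nat.mul_add_mod]
    have hidx : (if ((m % Z : Nat) : Int) + 1 = (Z : Int) then (0 : Int)
        else ((m % Z : Nat) : Int) + 1) = (((m + 1) % Z : Nat) : Int) := by
      by_cases hw : m % Z + 1 = Z
      · have h0 : (m + 1) % Z = 0 := by rw [hmod, hw, Nat.mod_self]
        rw [h0, if_pos (by push_cast; omega)]
        simp
      · have hlt : m % Z + 1 < Z := by omega
        have h0 : (m + 1) % Z = m % Z + 1 := by rw [hmod, Nat.mod_eq_of_lt hlt]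
        rw [h0, if_neg (by push_cast; omega)]
        push_cast
        ring
    simp only [pvALoop, hget, hset, hidx]
    rw [ih (m + 1), show m + 1 + k = m + (k + 1) by omega]

theorem pvState_zero (Z : Nat) : pvState Z 0 = List.replicate Z 0 := by
  apply List.ext_getElem
  · simp [pvState_length]
  · intro j hj _
    have hjZ : j < Z := by simpa [pvState_length] using hj
    rw [pvState_getElem Z 0 j hjZ]
    simp

theorem pvState_split (Z N : Nat) (hZ : 0 < Z) :
    pvState Z N =
      List.replicate (N % Z) (((N / Z : Nat) : Int) + 1) ++
        List.replicate (Z - N % Z) ((N / Z : Nat) : Int) := by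
  have hr : N % Z < Z := Nat.mod_lt _ hZ
  apply List.ext_getElem
  · simp [pvState_length]; omega
  · intro j hj hj'
    have hjZ : j < Z := by simpa [pvState_length] using hj
    rw [pvState_getElem Z N j hjZ]
    rcases Nat.lt_or_ge j (N % Z) with hc | hc
    · rw [List.getElem_append_left (by simpa using hc)]
      simp [hc]
    · rw [List.getElem_append_right (by simpa using hc)]
      simp [Nat.not_lt.mpr hc]

-- A's value for positive zone_count, in closed form
theorem pvA_pos (Z N : Nat) (hZ : 0 < Z) :
    get_node_count_per_zone (Z : Int) (N : Int) =
      List.replicate (N % Z) (((N / Z : Nat) : Int) + 1) ++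
        List.replicate (Z - N % Z) ((N / Z : Nat) : Int) := by
  unfold get_node_count_per_zone
  rw [show ((N : Int)).toNat = N from Int.toNat_natCast N,
      show ((Z : Int)).toNat = Z from Int.toNat_natCast Z,
      ← pvState_zero,
      show (0 : Int) = ((0 % Z : Nat) : Int) from by simp,
      pvALoop_inv Z hZ N 0]
  simp [pvState_split Z N hZ]

-- ===== VERDICT (by name: the statement is the Claim_ definition above) =====
theorem get_node_count_per_zone_spec : Claim_equal_get_node_count_per_zone := by
  intro zc nc _ hpre
  obtain ⟨hne, hcase⟩ := hpre
  unfold Spec_get_node_count_per_zone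
  rcases lt_trichotomy zc 0 with hneg | hzero | hpos
  · -- zc < 0, so nc ≤ 0: both sides are []
    have hnc : nc ≤ 0 := by rcases hcase with h | h; omega; exact h
    have hA : get_node_count_per_zone zc nc = [] := by
      unfold get_node_count_per_zone
      rw [show zc.toNat = 0 by omega, show nc.toNat = 0 by omega]
      simp [pvALoop]
    have hB : get_node_count_per_zone_alt zc nc = [] := by
      unfold get_node_count_per_zone_alt
      rw [show max nc 0 = 0 by omega]
      have hdm : PySem.Int.divmod? 0 zc = some (0, 0) := by
        simp [PySem.Int.divmod?, hne]
      rw [hdm]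
      simp
      omega
    rw [hA, hB]
  · omega
  · -- zc > 0
    obtain ⟨Z, hZ⟩ : ∃ Z : Nat, zc = (Z : Int) := ⟨zc.toNat, by omega⟩
    have hZpos : 0 < Z := by omega
    obtain ⟨N, hN⟩ : ∃ N : Nat, max nc 0 = (N : Int) := ⟨nc.toNat, by omega⟩
    have hB : get_node_count_per_zone_alt zc nc =
        List.replicate (N % Z) (((N / Z : Nat) : Int) + 1) ++
          List.replicate (Z - N % Z) ((N / Z : Nat) : Int) := by
      unfold get_node_count_per_zone_alt
      rw [hN, hZ]
      have hdm : PySem.Int.divmod? (N : Int) (Z : Int) =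
          some (((N / Z : Nat) : Int), ((N % Z : Nat) : Int)) := by
        simp [PySem.Int.divmod?]
        refine ⟨by omega, ?_, ?_⟩
        · rw [Int.fdiv_eq_ediv]; simp [show (0 : Int) ≤ Z by positivity]
        · rw [Int.fmod_eq_emod]; simp [show (0 : Int) ≤ Z by positivity]
      rw [hdm]
      have hr : N % Z < Z := Nat.mod_lt _ hZpos
      simp only [Int.toNat_natCast]
      rw [show (((Z : Int) - ((N % Z : Nat) : Int))).toNat = Z - N % Z by omega]
    have hAN : get_node_count_per_zone zc nc = get_node_count_per_zone (Z : Int) (N : Int) := by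
      unfold get_node_count_per_zone
      rw [hZ, show nc.toNat = N by omega, show ((N : Int)).toNat = N from Int.toNat_natCast N]
    rw [hAN, pvA_pos Z N hZpos, hB]
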